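-- pv_equiv track=rewrite | github.com/joshiaj7/CodingChallenges | python3/smallest_string_with_a_given_numeric_value.py | getSmallestString
-- ===== SOURCE A (Python) =====
-- def getSmallestString(n: int, k: int) -> str:
--     """
--     Personal Attempt
--     Space   : O(1)
--     Time    : O(n)
--     """
--     zs = 0
--
--     while k - 26 >= n - 1:
--         zs += 1
--         k -= 26
--         n -= 1
--
--     mid = ''
--     if k > n:
--         mid = chr(96 + k - n + 1)
--         k = k - n + 1
--         n -= 1
--
--     return 'a' * n + mid + 'z' * zs
-- ===== SOURCE B (Python) =====
-- def getSmallestString(n: int, k: int) -> str: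
--     # Closed form: the loop peels one trailing 'z' per step, each step reducing
--     # k-n by 25, so the number of z's is max(0, (k-n)//25); the rest is direct.
--     zs = max(0, (k - n) // 25)
--     n2 = n - zs
--     d = (k - 26 * zs) - n2
--     if d > 0:
--         return 'a' * (n2 - 1) + chr(97 + d) + 'z' * zs
--     return 'a' * n2 + 'z' * zs
-- ===== Notes on version B (the rewrite author's own statement) =====
-- stated objective: alternative
-- what changed: Replaces A's O(k) peeling while-loop with a direct closed-form computation: the z-count is max(0,(k-n)//25) and the three string parts are emitted in one shot.
import Mathlib
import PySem

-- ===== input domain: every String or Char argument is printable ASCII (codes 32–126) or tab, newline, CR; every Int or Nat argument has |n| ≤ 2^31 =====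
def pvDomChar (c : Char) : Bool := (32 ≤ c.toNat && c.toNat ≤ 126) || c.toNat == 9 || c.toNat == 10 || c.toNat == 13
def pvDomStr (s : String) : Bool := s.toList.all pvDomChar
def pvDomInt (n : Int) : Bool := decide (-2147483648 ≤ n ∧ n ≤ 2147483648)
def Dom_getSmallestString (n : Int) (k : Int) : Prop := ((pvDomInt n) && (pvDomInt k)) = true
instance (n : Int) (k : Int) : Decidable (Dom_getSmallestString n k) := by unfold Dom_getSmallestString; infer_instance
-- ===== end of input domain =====

-- B replaces A's peeling while-loop by closed-form arithmetic (alternative decomposition, same output).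

-- ===== PORT A =====
-- the while loop: state (n, k, zs); loop while k - 26 >= n - 1
def pvLoopA (n : Int) (k : Int) (zs : Int) : Int × Int × Int :=
  if k - 26 ≥ n - 1 then pvLoopA (n - 1) (k - 26) (zs + 1) else (n, k, zs)
termination_by (k - n).toNat
decreasing_by omega

def getSmallestString (n : Int) (k : Int) : String :=
  let s := pvLoopA n k 0
  let n' := s.1
  let k' := s.2.1
  let zs := s.2.2
  let mid : String := if k' > n' then String.mk [Char.ofNat (96 + k' - n' + 1).toNat] else ""
  let n'' := if k' > n' then n' - 1 else n'
  String.mk (List.replicate n''.toNat 'a') ++ mid ++ String.mk (List.replicate zs.toNat 'z')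

-- ===== PORT B =====
def getSmallestString_alt (n : Int) (k : Int) : String :=
  let zs := max 0 (PySem.Int.floordiv (k - n) 25)
  let n2 := n - zs
  let d := (k - 26 * zs) - n2
  if d > 0 then
    String.mk (List.replicate (n2 - 1).toNat 'a') ++ String.mk [Char.ofNat (97 + d).toNat]
      ++ String.mk (List.replicate zs.toNat 'z')
  else
    String.mk (List.replicate n2.toNat 'a') ++ String.mk (List.replicate zs.toNat 'z')

-- ===== PRECONDITION & SPEC =====
def Spec_getSmallestString (n : Int) (k : Int) (out : String) : Prop := out = getSmallestString_alt n k
instance (n : Int) (k : Int) (out : String) : Decidable (Spec_getSmallestString n k out) := by unfold Spec_getSmallestString; infer_instance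

-- ===== CLAIM (what is proved, stated in full; the proofs are below) =====
def Claim_equal_getSmallestString : Prop := ∀ (n : Int) (k : Int), Dom_getSmallestString n k → Spec_getSmallestString n k (getSmallestString n k)

-- ===== LEMMAS AND PROOFS =====

-- The loop computes exactly the closed form: it runs m = max 0 ((k-n)/25) times.
theorem pvLoopA_eq (n k z : Int) :
    pvLoopA n k z = (n - max 0 ((k - n) / 25), k - 26 * max 0 ((k - n) / 25), z + max 0 ((k - n) / 25)) := by
  induction h : (k - n).toNat using Nat.strong_induction_on generalizing n k z with
  | _ t ih =>
    rw [pvLoopA]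
    split
    · rename_i hc
      have hge : k - n ≥ 25 := by omega
      rw [ih ((k - 26) - (n - 1)).toNat (by omega) (n - 1) (k - 26) (z + 1) rfl]
      have h1 : (k - 26 - (n - 1)) = (k - n) - 25 := by ring
      have h2 : ((k - n) - 25) / 25 = (k - n) / 25 - 1 := by omega
      have h3 : (k - n) / 25 ≥ 1 := by omega
      rw [h1, h2]
      have h4 : max 0 ((k - n) / 25 - 1) = (k - n) / 25 - 1 := by omega
      have h5 : max 0 ((k - n) / 25) = (k - n) / 25 := by omega
      rw [h4, h5]
      refine Prod.ext (by ring) (Prod.ext (by ring) (by ring))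
    · rename_i hc
      have hlt : k - n < 25 := by omega
      have h5 : max 0 ((k - n) / 25) = 0 := by omega
      rw [h5]
      refine Prod.ext (by ring) (Prod.ext (by ring) (by ring))

-- ===== VERDICT (by name: the statement is the Claim_ definition above) =====
theorem getSmallestString_spec : Claim_equal_getSmallestString := by
  intro n k _
  unfold Spec_getSmallestString getSmallestString getSmallestString_alt
  rw [pvLoopA_eq]
  rw [PySem.Int.floordiv_eq_ediv_of_pos (by norm_num)]
  set m := max 0 ((k - n) / 25) with hm
  simp only [zero_add]
  have hd : (k - 26 * m) - (n - m) = k - n - 25 * m := by ring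
  by_cases hgt : k - 26 * m > n - m
  · simp only [if_pos hgt, if_pos (by omega : (k - 26 * m) - (n - m) > 0)]
    have he : 96 + (k - 26 * m) - (n - m) + 1 = 97 + ((k - 26 * m) - (n - m)) := by ring
    rw [he]
  · simp only [if_neg hgt, if_neg (by omega : ¬ ((k - 26 * m) - (n - m)) > 0)]
    simp
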